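-- pv_equiv track=rewrite | github.com/AI-Hypercomputer/accelerator-agents | MaxKernel/tpu_kernel_gen/agents/kernel_bench_eval/analyze.py | analyze_compilation_results
-- ===== SOURCE A (Python) =====
-- from typing import Any, Dict, List, Tuple
--
-- def analyze_compilation_results(data: Dict[str, Any]) -> Dict[str, int]:
--   """Analyze compilation success/failure rates."""
--   stats = {
--     "base_kernel_success": 0,
--     "base_kernel_failure": 0,
--     "tiled_kernel_success": 0,
--     "tiled_kernel_failure": 0,
--     "total_kernels": len(data),
--   }
--
--   for kernel_id, results in data.items():
--     # Base kernel compilation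
--     if results.get("base_kernel_compilation_result") == "Success":
--       stats["base_kernel_success"] += 1
--     else:
--       stats["base_kernel_failure"] += 1
--
--     # Tiled kernel compilation
--     tiled_result = results.get("tiled_kernel_compilation_result")
--     if tiled_result == "Success":
--       stats["tiled_kernel_success"] += 1
--     elif tiled_result and tiled_result != "Success":
--       stats["tiled_kernel_failure"] += 1
--
--   return stats
-- ===== SOURCE B (Python) =====
-- def analyze_compilation_results(data):
--   """Analyze compilation success/failure rates (separate counting passes)."""
--   results_list = list(data.values())
--   total = len(results_list)
--   base_success = sum(1 for r in results_list
--                      if r.get("base_kernel_compilation_result") == "Success")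
--   tiled_success = sum(1 for r in results_list
--                       if r.get("tiled_kernel_compilation_result") == "Success")
--   tiled_failure = sum(1 for r in results_list
--                       if r.get("tiled_kernel_compilation_result")
--                       and r.get("tiled_kernel_compilation_result") != "Success")
--   return {
--     "base_kernel_success": base_success,
--     "base_kernel_failure": total - base_success,
--     "tiled_kernel_success": tiled_success,
--     "tiled_kernel_failure": tiled_failure,
--     "total_kernels": total,
--   }
-- ===== Notes on version B (the rewrite author's own statement) =====
-- stated objective: alternative
-- what changed: Replaces the single accumulating loop that mutates a stats dict with independent counting passes (one count per statistic) and derives base_kernel_failure as total - base_kernel_success, assembling the dict once at the end.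
import Mathlib
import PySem

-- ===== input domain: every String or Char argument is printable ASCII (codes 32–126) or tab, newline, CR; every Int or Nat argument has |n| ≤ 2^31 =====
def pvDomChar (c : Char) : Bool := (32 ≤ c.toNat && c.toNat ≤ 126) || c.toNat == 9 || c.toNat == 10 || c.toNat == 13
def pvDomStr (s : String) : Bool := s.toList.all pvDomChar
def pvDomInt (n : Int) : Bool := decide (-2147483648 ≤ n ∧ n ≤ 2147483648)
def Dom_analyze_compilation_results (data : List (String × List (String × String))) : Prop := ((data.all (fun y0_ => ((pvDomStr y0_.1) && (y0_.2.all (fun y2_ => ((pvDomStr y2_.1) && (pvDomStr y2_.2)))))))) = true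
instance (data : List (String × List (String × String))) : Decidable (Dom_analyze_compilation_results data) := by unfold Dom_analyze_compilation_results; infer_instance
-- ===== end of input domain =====

-- B replaces A's single accumulating loop over a mutated stats dict by independent counting
-- passes (one per statistic), deriving base_kernel_failure as total - base_kernel_success
-- (objective: alternative decomposition, same O(n) cost).


-- ===== PORT A =====
-- loop body of A: all five keys are present in stats from the start, so Python's
-- `stats[k] += 1` is exactly `Dict.modify k 0 (· + 1)` here.
def pvStepA (stats : PySem.Dict String Int) (kv : String × List (String × String)) :
    PySem.Dict String Int :=
  let results : PySem.Dict String String := PySem.Dict.mk kv.2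
  let stats :=
    if results.get? "base_kernel_compilation_result" = some "Success" then
      stats.modify "base_kernel_success" 0 (· + 1)
    else
      stats.modify "base_kernel_failure" 0 (· + 1)
  let tiled_result := results.get? "tiled_kernel_compilation_result"
  if tiled_result = some "Success" then
    stats.modify "tiled_kernel_success" 0 (· + 1)
  else if ((match tiled_result with | some t => t != "" | none => false) &&
           (tiled_result != some "Success")) then
    -- `elif tiled_result and tiled_result != "Success"`: truthiness of an Optional[str]
    stats.modify "tiled_kernel_failure" 0 (· + 1)
  else
    stats

def analyze_compilation_results (data : List (String × List (String × String))) :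
    List (String × Int) :=
  let stats : PySem.Dict String Int := PySem.Dict.mk
    [("base_kernel_success", 0), ("base_kernel_failure", 0),
     ("tiled_kernel_success", 0), ("tiled_kernel_failure", 0),
     ("total_kernels", (data.length : Int))]
  (data.foldl pvStepA stats).items

-- ===== PORT B =====
def pvIsBaseSuccess (r : List (String × String)) : Bool :=
  (PySem.Dict.mk r).get? "base_kernel_compilation_result" == some "Success"

def pvIsTiledSuccess (r : List (String × String)) : Bool :=
  (PySem.Dict.mk r).get? "tiled_kernel_compilation_result" == some "Success"

-- truthy and different from "Success"
def pvIsTiledFailure (r : List (String × String)) : Bool :=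
  match (PySem.Dict.mk r).get? "tiled_kernel_compilation_result" with
  | some t => t != "" && t != "Success"
  | none => false

def analyze_compilation_results_alt (data : List (String × List (String × String))) :
    List (String × Int) :=
  let results_list := data.map (·.2)
  let total : Int := results_list.length
  let base_success : Int := results_list.countP pvIsBaseSuccess
  let tiled_success : Int := results_list.countP pvIsTiledSuccess
  let tiled_failure : Int := results_list.countP pvIsTiledFailure
  [("base_kernel_success", base_success),
   ("base_kernel_failure", total - base_success),
   ("tiled_kernel_success", tiled_success),
   ("tiled_kernel_failure", tiled_failure),
   ("total_kernels", total)]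

-- ===== PRECONDITION & SPEC =====
def Spec_analyze_compilation_results (data : List (String × List (String × String))) (out : List (String × Int)) : Prop := out = analyze_compilation_results_alt data
instance (data : List (String × List (String × String))) (out : List (String × Int)) : Decidable (Spec_analyze_compilation_results data out) := by unfold Spec_analyze_compilation_results; infer_instance

-- ===== CLAIM (what is proved, stated in full; the proofs are below) =====
def Claim_equal_analyze_compilation_results : Prop := ∀ (data : List (String × List (String × String))), Dom_analyze_compilation_results data → Spec_analyze_compilation_results data (analyze_compilation_results data)

-- ===== LEMMAS AND PROOFS =====

-- pvStepA re-expressed through the three predicates of port B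
theorem pvStepA_eq (stats : PySem.Dict String Int) (kv : String × List (String × String)) :
    pvStepA stats kv =
      (let s1 := if pvIsBaseSuccess kv.2 then stats.modify "base_kernel_success" 0 (· + 1)
                 else stats.modify "base_kernel_failure" 0 (· + 1)
       if pvIsTiledSuccess kv.2 then s1.modify "tiled_kernel_success" 0 (· + 1)
       else if pvIsTiledFailure kv.2 then s1.modify "tiled_kernel_failure" 0 (· + 1)
       else s1) := by
  unfold pvStepA pvIsBaseSuccess pvIsTiledSuccess pvIsTiledFailure
  rcases h : (PySem.Dict.mk kv.2).get? "tiled_kernel_compilation_result" with _ | t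
  · simp [h, beq_iff_eq]
  · by_cases h1 : t = "Success" <;> by_cases h2 : t = "" <;>
      simp [h, h1, h2, beq_iff_eq]

theorem pvModBS (a b c d n : Int) :
    (PySem.Dict.mk [("base_kernel_success", a), ("base_kernel_failure", b),
      ("tiled_kernel_success", c), ("tiled_kernel_failure", d),
      ("total_kernels", n)]).modify "base_kernel_success" 0 (· + 1) =
    PySem.Dict.mk [("base_kernel_success", a + 1), ("base_kernel_failure", b),
      ("tiled_kernel_success", c), ("tiled_kernel_failure", d),
      ("total_kernels", n)] := by
  simp [PySem.Dict.modify, PySem.Dict.insert, PySem.Dict.getD, PySem.Dict.get?,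
        PySem.Dict.contains]

theorem pvModBF (a b c d n : Int) :
    (PySem.Dict.mk [("base_kernel_success", a), ("base_kernel_failure", b),
      ("tiled_kernel_success", c), ("tiled_kernel_failure", d),
      ("total_kernels", n)]).modify "base_kernel_failure" 0 (· + 1) =
    PySem.Dict.mk [("base_kernel_success", a), ("base_kernel_failure", b + 1),
      ("tiled_kernel_success", c), ("tiled_kernel_failure", d),
      ("total_kernels", n)] := by
  simp [PySem.Dict.modify, PySem.Dict.insert, PySem.Dict.getD, PySem.Dict.get?,
        PySem.Dict.contains]

theorem pvModTS (a b c d n : Int) :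
    (PySem.Dict.mk [("base_kernel_success", a), ("base_kernel_failure", b),
      ("tiled_kernel_success", c), ("tiled_kernel_failure", d),
      ("total_kernels", n)]).modify "tiled_kernel_success" 0 (· + 1) =
    PySem.Dict.mk [("base_kernel_success", a), ("base_kernel_failure", b),
      ("tiled_kernel_success", c + 1), ("tiled_kernel_failure", d),
      ("total_kernels", n)] := by
  simp [PySem.Dict.modify, PySem.Dict.insert, PySem.Dict.getD, PySem.Dict.get?,
        PySem.Dict.contains]

theorem pvModTF (a b c d n : Int) :
    (PySem.Dict.mk [("base_kernel_success", a), ("base_kernel_failure", b),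
      ("tiled_kernel_success", c), ("tiled_kernel_failure", d),
      ("total_kernels", n)]).modify "tiled_kernel_failure" 0 (· + 1) =
    PySem.Dict.mk [("base_kernel_success", a), ("base_kernel_failure", b),
      ("tiled_kernel_success", c), ("tiled_kernel_failure", d + 1),
      ("total_kernels", n)] := by
  simp [PySem.Dict.modify, PySem.Dict.insert, PySem.Dict.getD, PySem.Dict.get?,
        PySem.Dict.contains]

-- a tiled result equal to "Success" is never counted as a tiled failure
theorem pvTSnotTF (r : List (String × String)) (h : pvIsTiledSuccess r = true) :
    pvIsTiledFailure r = false := by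
  unfold pvIsTiledSuccess at h
  unfold pvIsTiledFailure
  rcases hg : (PySem.Dict.mk r).get? "tiled_kernel_compilation_result" with _ | t <;>
    simp [hg] at h ⊢
  simp [h]

-- Invariant: folding A's loop body over l adds the three counts componentwise
-- (and the complement count for base failure).
theorem pvLoopA (l : List (String × List (String × String))) :
    ∀ (a b c d n : Int),
    (l.foldl pvStepA (PySem.Dict.mk
      [("base_kernel_success", a), ("base_kernel_failure", b),
       ("tiled_kernel_success", c), ("tiled_kernel_failure", d),
       ("total_kernels", n)])).items =
    [("base_kernel_success", a + (l.map (·.2)).countP pvIsBaseSuccess),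
     ("base_kernel_failure", b + (l.map (·.2)).countP (fun r => ! pvIsBaseSuccess r)),
     ("tiled_kernel_success", c + (l.map (·.2)).countP pvIsTiledSuccess),
     ("tiled_kernel_failure", d + (l.map (·.2)).countP pvIsTiledFailure),
     ("total_kernels", n)] := by
  induction l with
  | nil => intro a b c d n; simp
  | cons hd tl ih =>
    intro a b c d n
    rw [List.foldl_cons, pvStepA_eq]
    cases hB : pvIsBaseSuccess hd.2 <;> cases hT : pvIsTiledSuccess hd.2 <;>
      cases hF : pvIsTiledFailure hd.2 <;>
      simp only [if_true, if_false, Bool.false_eq_true,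
                 pvModBS, pvModBF, pvModTS, pvModTF, ih, List.map_cons,
                 List.countP_cons, hB, hT, hF] <;>
      simp [add_comm, add_assoc] <;>
      simp [pvTSnotTF hd.2 hT] at hF

theorem pvCountPNot (l : List (List (String × String))) :
    (l.countP (fun r => ! pvIsBaseSuccess r) : Int) =
      (l.length : Int) - (l.countP pvIsBaseSuccess : Int) := by
  have h := List.length_eq_countP_add_countP (l := l) (p := pvIsBaseSuccess)
  have e : l.countP (fun a => !pvIsBaseSuccess a) =
      l.countP fun a => decide ¬pvIsBaseSuccess a = true := by
    apply List.countP_congr; intro a _; cases pvIsBaseSuccess a <;> simp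
  omega

-- ===== VERDICT (by name: the statement is the Claim_ definition above) =====
theorem analyze_compilation_results_spec : Claim_equal_analyze_compilation_results := by
  intro data _
  unfold Spec_analyze_compilation_results analyze_compilation_results
    analyze_compilation_results_alt
  simp only [pvLoopA, List.length_map, zero_add, pvCountPNot]
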